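-- pv_equiv track=rewrite | github.com/M-110/python-challenges | challenges/ch02_math/solutions/ex01_basics.py | calc_sum_and_count_all_numbers_div_by_2_or_7
-- ===== SOURCE A (Python) =====
-- def calc_sum_and_count_all_numbers_div_by_2_or_7(max_exclusive):
--     count = 0
--     total = 0
--     for i in range(3, max_exclusive):
--         if not i % 2:
--             count += 1
--             total += i
--         elif not i % 7:
--             count += 1
--             total += i
--     return count, total
-- ===== SOURCE B (Python) =====
-- def calc_sum_and_count_all_numbers_div_by_2_or_7(max_exclusive):
--     # closed-form inclusion-exclusion over multiples of 2, 7 and 14 in [3, max_exclusive)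
--     m = max_exclusive if max_exclusive > 3 else 3
--     def cnt_sum(k):
--         lo = 2 // k
--         hi = (m - 1) // k
--         return hi - lo, k * (hi * (hi + 1) - lo * (lo + 1)) // 2
--     c2, s2 = cnt_sum(2)
--     c7, s7 = cnt_sum(7)
--     c14, s14 = cnt_sum(14)
--     return c2 + c7 - c14, s2 + s7 - s14
-- ===== Notes on version B (the rewrite author's own statement) =====
-- stated objective: faster
-- what changed: Replaced the O(n) scan of range(3, max_exclusive) with O(1) inclusion-exclusion arithmetic-series formulas counting and summing the multiples of 2, 7 and 14 in [3, max_exclusive).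
import Mathlib
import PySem

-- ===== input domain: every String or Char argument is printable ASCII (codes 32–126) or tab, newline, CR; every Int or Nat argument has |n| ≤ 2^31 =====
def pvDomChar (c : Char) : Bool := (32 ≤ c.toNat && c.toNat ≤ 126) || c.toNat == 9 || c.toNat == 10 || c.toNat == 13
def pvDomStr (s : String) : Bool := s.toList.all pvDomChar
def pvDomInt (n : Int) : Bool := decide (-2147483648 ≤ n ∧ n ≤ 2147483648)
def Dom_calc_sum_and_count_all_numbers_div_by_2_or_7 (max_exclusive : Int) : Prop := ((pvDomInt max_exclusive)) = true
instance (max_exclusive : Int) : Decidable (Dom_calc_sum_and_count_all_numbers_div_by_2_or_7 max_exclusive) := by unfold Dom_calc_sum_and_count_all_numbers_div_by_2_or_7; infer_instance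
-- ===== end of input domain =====

-- B replaces A's O(n) scan by O(1) inclusion-exclusion arithmetic-series formulas for the multiples of 2, 7 and 14 in [3, max_exclusive).

-- ===== PORT A =====
def calc_sum_and_count_all_numbers_div_by_2_or_7 (max_exclusive : Int) : List Int :=
  let st := (PySem.List.pyRange 3 max_exclusive 1).foldl
    (fun (s : Int × Int) i =>
      if PySem.Int.mod i 2 = 0 then (s.1 + 1, s.2 + i)
      else if PySem.Int.mod i 7 = 0 then (s.1 + 1, s.2 + i)
      else s) (0, 0)
  [st.1, st.2]

-- ===== PORT B =====
-- count and sum of the multiples of k in [3, m)  (Source B's cnt_sum)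
def pvCntSum (m k : Int) : Int × Int :=
  let lo := PySem.Int.floordiv 2 k
  let hi := PySem.Int.floordiv (m - 1) k
  (hi - lo, PySem.Int.floordiv (k * (hi * (hi + 1) - lo * (lo + 1))) 2)

def calc_sum_and_count_all_numbers_div_by_2_or_7_alt (max_exclusive : Int) : List Int :=
  let m := if max_exclusive > 3 then max_exclusive else 3
  let p2 := pvCntSum m 2
  let p7 := pvCntSum m 7
  let p14 := pvCntSum m 14
  [p2.1 + p7.1 - p14.1, p2.2 + p7.2 - p14.2]

-- ===== PRECONDITION & SPEC =====
def Spec_calc_sum_and_count_all_numbers_div_by_2_or_7 (max_exclusive : Int) (out : List Int) : Prop := out = calc_sum_and_count_all_numbers_div_by_2_or_7_alt max_exclusive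
instance (max_exclusive : Int) (out : List Int) : Decidable (Spec_calc_sum_and_count_all_numbers_div_by_2_or_7 max_exclusive out) := by unfold Spec_calc_sum_and_count_all_numbers_div_by_2_or_7; infer_instance

-- ===== CLAIM (what is proved, stated in full; the proofs are below) =====
def Claim_equal_calc_sum_and_count_all_numbers_div_by_2_or_7 : Prop := ∀ (max_exclusive : Int), Dom_calc_sum_and_count_all_numbers_div_by_2_or_7 max_exclusive → Spec_calc_sum_and_count_all_numbers_div_by_2_or_7 max_exclusive (calc_sum_and_count_all_numbers_div_by_2_or_7 max_exclusive)

-- ===== LEMMAS AND PROOFS =====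

-- closed form written with ediv (what pvCntSum computes for m >= 3)
def pvClosedCnt (m : Int) : Int := (m-1)/2 - 1 + (m-1)/7 - (m-1)/14
def pvClosedSum (m : Int) : Int :=
  2 * ((m-1)/2 * ((m-1)/2 + 1) - 2) / 2 + 7 * ((m-1)/7 * ((m-1)/7 + 1)) / 2
    - 14 * ((m-1)/14 * ((m-1)/14 + 1)) / 2
def pvClosed (m : Int) : Int × Int := (pvClosedCnt m, pvClosedSum m)

theorem pvCntSum_eq (m : Int) (hm : 3 ≤ m) :
    calc_sum_and_count_all_numbers_div_by_2_or_7_alt m = [(pvClosed m).1, (pvClosed m).2] := by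
  simp only [calc_sum_and_count_all_numbers_div_by_2_or_7_alt, pvCntSum, pvClosed,
    pvClosedCnt, pvClosedSum]
  have e2 := PySem.Int.floordiv_eq_ediv_of_pos (a := m - 1) (b := 2) (by omega)
  have e7 := PySem.Int.floordiv_eq_ediv_of_pos (a := m - 1) (b := 7) (by omega)
  have e14 := PySem.Int.floordiv_eq_ediv_of_pos (a := m - 1) (b := 14) (by omega)
  by_cases h : m > 3
  · simp only [if_pos h, e2, e7, e14]
    have l2 : PySem.Int.floordiv 2 2 = 1 := by decide
    have l7 : PySem.Int.floordiv 2 7 = 0 := by decide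
    have l14 : PySem.Int.floordiv 2 14 = 0 := by decide
    rw [l2, l7, l14,
        PySem.Int.floordiv_eq_ediv_of_pos (by omega : (0:Int) < 2),
        PySem.Int.floordiv_eq_ediv_of_pos (by omega : (0:Int) < 2),
        PySem.Int.floordiv_eq_ediv_of_pos (by omega : (0:Int) < 2)]
    norm_num
  · have hm3 : m = 3 := by omega
    subst hm3
    decide

-- arithmetic-series step for one divisor
theorem pvSeries_aux (k m h h' : Int) (hm : 3 ≤ m)
    (hd : (h' = h ∧ ¬ m % k = 0) ∨ (h' = h + 1 ∧ m % k = 0 ∧ m = k * h')) :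
    k * (h' * (h' + 1)) / 2
      = k * (h * (h + 1)) / 2 + (if m % k = 0 then m else 0) := by
  obtain ⟨p, hpe⟩ : (2:Int) ∣ h * (h + 1) := (Int.even_mul_succ_self h).two_dvd
  rcases hd with ⟨he, hne⟩ | ⟨he, hz, hmk⟩
  · simp [he, hne]
  · subst he
    rw [if_pos hz]
    have hexp : (h + 1) * (h + 1 + 1) = h * (h + 1) + 2 * (h + 1) := by ring
    rw [hexp, hpe]
    have : k * (2 * p + 2 * (h + 1)) = 2 * (k * p + k * (h+1)) := by ring
    rw [this]
    have : k * (2 * p) = 2 * (k * p) := by ring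
    rw [this]
    omega

theorem pvSeries_step (k m : Int) (hk : k = 2 ∨ k = 7 ∨ k = 14) (hm : 3 ≤ m) :
    k * (m / k * (m / k + 1)) / 2
      = k * ((m-1) / k * ((m-1) / k + 1)) / 2 + (if m % k = 0 then m else 0) := by
  apply pvSeries_aux k m ((m-1)/k) (m/k) hm
  rcases hk with rfl | rfl | rfl <;> omega

theorem pvCnt_step (m : Int) (hm : 3 ≤ m) :
    pvClosedCnt (m + 1) =
      pvClosedCnt m + (if m % 2 = 0 then 1 else if m % 7 = 0 then 1 else 0) := by
  simp only [pvClosedCnt, add_sub_cancel_right]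
  have e7 : m/7 = (m-1)/7 + (if m % 7 = 0 then 1 else 0) := by split_ifs <;> omega
  have e14 : m/14 = (m-1)/14 + (if m % 14 = 0 then 1 else 0) := by split_ifs <;> omega
  have h147 : m % 14 = 0 ↔ (m % 2 = 0 ∧ m % 7 = 0) := by omega
  split_ifs at e7 e14 ⊢ <;> omega

theorem pvSum_step (m : Int) (hm : 3 ≤ m) :
    pvClosedSum (m + 1) =
      pvClosedSum m + (if m % 2 = 0 then m else if m % 7 = 0 then m else 0) := by
  have s2' := pvSeries_step 2 m (Or.inl rfl) hm
  have s7 := pvSeries_step 7 m (Or.inr (Or.inl rfl)) hm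
  have s14 := pvSeries_step 14 m (Or.inr (Or.inr rfl)) hm
  have s2 : (2:Int) * ((m/2) * (m/2 + 1) - 2) / 2
      = 2 * (((m-1)/2) * ((m-1)/2 + 1) - 2) / 2 + (if m % 2 = 0 then m else 0) := by
    obtain ⟨p, hpe⟩ : (2:Int) ∣ ((m-1)/2) * ((m-1)/2 + 1) :=
      (Int.even_mul_succ_self _).two_dvd
    obtain ⟨p', hpe'⟩ : (2:Int) ∣ (m/2) * (m/2 + 1) :=
      (Int.even_mul_succ_self _).two_dvd
    rw [hpe, hpe'] at s2' ⊢
    split_ifs at s2' ⊢ <;> omega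
  simp only [pvClosedSum, add_sub_cancel_right]
  rw [s2, s7, s14]
  have h147 : m % 14 = 0 ↔ (m % 2 = 0 ∧ m % 7 = 0) := by omega
  split_ifs <;> omega

theorem pvClosed_step (m : Int) (hm : 3 ≤ m) :
    pvClosed (m + 1) =
      (if m % 2 = 0 then ((pvClosed m).1 + 1, (pvClosed m).2 + m)
       else if m % 7 = 0 then ((pvClosed m).1 + 1, (pvClosed m).2 + m)
       else pvClosed m) := by
  have hc := pvCnt_step m hm
  have hs := pvSum_step m hm
  simp only [pvClosed] at *
  split_ifs at hc hs ⊢ <;> exact Prod.ext_iff.mpr ⟨by omega, by omega⟩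

-- main loop lemma
theorem pvLoop_eq (m : Int) (hm : 3 ≤ m) :
    (PySem.List.pyRange 3 m 1).foldl
      (fun (s : Int × Int) i =>
        if PySem.Int.mod i 2 = 0 then (s.1 + 1, s.2 + i)
        else if PySem.Int.mod i 7 = 0 then (s.1 + 1, s.2 + i)
        else s) (0, 0) = pvClosed m := by
  obtain ⟨n, rfl⟩ : ∃ n : Nat, m = 3 + n := ⟨(m - 3).toNat, by omega⟩
  induction n with
  | zero => decide
  | succ k ih =>
    have hk : (3:Int) ≤ 3 + k := by omega
    have : (3:Int) + (k+1 : Nat) = (3 + k) + 1 := by push_cast; ring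
    rw [this, PySem.List.pyRange_one_succ_right (by omega), List.foldl_append, ih (by omega)]
    simp only [List.foldl]
    rw [pvClosed_step _ hk]
    have hpos : (0:Int) < 3 + k := by omega
    rw [PySem.Int.mod_eq_emod_of_pos (by omega : (0:Int) < 2),
        PySem.Int.mod_eq_emod_of_pos (by omega : (0:Int) < 7)]

-- ===== VERDICT (by name: the statement is the Claim_ definition above) =====
theorem calc_sum_and_count_all_numbers_div_by_2_or_7_spec : Claim_equal_calc_sum_and_count_all_numbers_div_by_2_or_7 := by
  intro m _
  unfold Spec_calc_sum_and_count_all_numbers_div_by_2_or_7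
  by_cases hm : 3 ≤ m
  · rw [pvCntSum_eq m hm]
    unfold calc_sum_and_count_all_numbers_div_by_2_or_7
    rw [pvLoop_eq m hm]
  · have hnil : PySem.List.pyRange 3 m 1 = [] := PySem.List.pyRange_one_eq_nil (by omega)
    unfold calc_sum_and_count_all_numbers_div_by_2_or_7 calc_sum_and_count_all_numbers_div_by_2_or_7_alt
    rw [hnil]
    have : ¬ (m > 3) := by omega
    simp [this, pvCntSum]
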